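-- pv_equiv track=rewrite | github.com/r-aax/wav-inspect | src/wi_utils.py | markers_true_intervals
-- ===== SOURCE A (Python) =====
-- def markers_true_intervals(a):
--     """
--     Получение интервалов из списка маркеров.
--
--     :param a: Список маркеров.
--
--     :return: Список интервалов.
--     """
--
--     intervals = []
--     begin = -1
--
--     for i in range(len(a)):
--
--         if a[i]:
--
--             # Если интервал не инициирован, то инициируем его.
--             # Если интервал инициирован, то игнорируем.
--             if begin == -1:
--                 begin = i
--
--             # Нужно еще проверить на последнее значение.
--             if i == len(a) - 1:
--                 intervals.append((begin, i))
--
--         else: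
--
--             # Если интервал открыт, то закрываем его, добавляем в список
--             # и сбрасываем координату его начала.
--             if begin >= 0:
--                 intervals.append((begin, i - 1))
--                 begin = -1
--
--     return intervals
-- ===== SOURCE B (Python) =====
-- from itertools import groupby
--
--
-- def markers_true_intervals(a):
--     """
--     Получение интервалов из списка маркеров.
--
--     :param a: Список маркеров.
--
--     :return: Список интервалов.
--     """
--
--     intervals = []
--
--     for key, group in groupby(enumerate(a), key=lambda p: bool(p[1])):
--         if key:
--             g = list(group)
--             intervals.append((g[0][0], g[-1][0]))
--
--     return intervals
-- ===== Notes on version B (the rewrite author's own statement) =====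
-- stated objective: idiomatic
-- what changed: Replaced the index loop with its begin sentinel and last-element check by itertools.groupby over enumerate(a): each truthy run becomes one group whose first and last indices give the interval.
import Mathlib
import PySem

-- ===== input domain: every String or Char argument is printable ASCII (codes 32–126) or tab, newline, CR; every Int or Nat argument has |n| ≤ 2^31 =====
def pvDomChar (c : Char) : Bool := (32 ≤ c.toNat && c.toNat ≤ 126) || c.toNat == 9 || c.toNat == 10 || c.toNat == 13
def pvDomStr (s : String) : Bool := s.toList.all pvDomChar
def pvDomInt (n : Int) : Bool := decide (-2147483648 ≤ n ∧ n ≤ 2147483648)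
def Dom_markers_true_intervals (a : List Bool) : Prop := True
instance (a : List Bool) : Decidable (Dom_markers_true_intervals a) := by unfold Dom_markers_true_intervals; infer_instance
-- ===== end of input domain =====

-- B replaces A's index loop with its begin sentinel and last-element check by
-- itertools.groupby over enumerate(a) (idiomatic; same O(n) cost, no speed claim).

-- ===== PORT A =====
-- loop body of A's 'for i in range(len(a))'; state = (intervals, begin).
-- a[i] with 0 ≤ i < len(a) is exact as List.getD.
def stepA (a : List Bool) (st : List (Int × Int) × Int) (i : Nat) : List (Int × Int) × Int :=
  if a.getD i false then
    let begin_ := if st.2 = -1 then (i : Int) else st.2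
    if i = a.length - 1 then (st.1 ++ [(begin_, (i : Int))], begin_)
    else (st.1, begin_)
  else
    if 0 ≤ st.2 then (st.1 ++ [(st.2, (i : Int) - 1)], (-1 : Int))
    else st

def markers_true_intervals (a : List Bool) : List (Int × Int) :=
  ((List.range a.length).foldl (stepA a) ([], -1)).1

-- ===== PORT B =====
-- itertools.groupby on a list of (index, value) pairs, keyed by the value:
-- each group is the maximal run of consecutive pairs with equal second component.
def pyGroupBy (l : List (Int × Bool)) : List (Bool × List (Int × Bool)) :=
  match l with
  | [] => []
  | x :: xs =>
    (x.2, x :: xs.takeWhile (fun y => y.2 == x.2))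
      :: pyGroupBy (xs.dropWhile (fun y => y.2 == x.2))
termination_by l.length
decreasing_by exact Nat.lt_succ_of_le (List.length_dropWhile_le _ _)

-- B's loop body: for a truthy group append (g[0][0], g[-1][0]).
def emitGroup (res : List (Int × Int)) (kg : Bool × List (Int × Bool)) : List (Int × Int) :=
  if kg.1 then
    match kg.2 with
    | [] => res                               -- unreachable: groupby groups are nonempty
    | p :: ps => res ++ [(p.1, (ps.getLastD p).1)]
  else res

def markers_true_intervals_alt (a : List Bool) : List (Int × Int) :=
  (pyGroupBy (PySem.List.enumerate a 0)).foldl emitGroup []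

-- ===== PRECONDITION & SPEC =====
def Spec_markers_true_intervals (a : List Bool) (out : List (Int × Int)) : Prop := out = markers_true_intervals_alt a
instance (a : List Bool) (out : List (Int × Int)) : Decidable (Spec_markers_true_intervals a out) := by unfold Spec_markers_true_intervals; infer_instance

-- ===== CLAIM (what is proved, stated in full; the proofs are below) =====
def Claim_equal_markers_true_intervals : Prop := ∀ (a : List Bool), Dom_markers_true_intervals a → Spec_markers_true_intervals a (markers_true_intervals a)

-- ===== LEMMAS AND PROOFS =====

-- Reference decomposition: the intervals of a suffix whose first index is j.
def specRuns (j : Int) : List Bool → List (Int × Int)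
  | [] => []
  | x :: t =>
    if x then
      (j, j + (t.takeWhile (fun v => v == true)).length)
        :: specRuns (j + 1 + (t.takeWhile (fun v => v == true)).length) (t.dropWhile (fun v => v == true))
    else specRuns (j + 1) t
termination_by t => t.length
decreasing_by
  · exact Nat.lt_succ_of_le (List.length_dropWhile_le _ _)
  · exact Nat.lt_succ_self _

-- A's loop, as recursion over the suffix with the open-interval state made explicit.
def refS : Option Int → Int → List Bool → List (Int × Int)
  | _, _, [] => []
  | st, j, true :: t =>
    if t.isEmpty then [(st.getD j, j)] else refS (some (st.getD j)) (j + 1) t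
  | some b, j, false :: t => (b, j - 1) :: refS none (j + 1) t
  | none, j, false :: t => refS none (j + 1) t

def stI : Option Nat → Int
  | none => -1
  | some b => (b : Int)

theorem specRuns_congr {j j' : Int} (h : j = j') (l : List Bool) : specRuns j l = specRuns j' l := by rw [h]

theorem dropWhile_head_not {α : Type} (p : α → Bool) : ∀ (l : List α) (y : α) (r : List α),
    l.dropWhile p = y :: r → p y = false := by
  intro l
  induction l with
  | nil => intro y r h; simp at h
  | cons x t ih =>
    intro y r h
    by_cases hx : p x = true
    · rw [List.dropWhile_cons_of_pos hx] at h; exact ih _ _ h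
    · rw [List.dropWhile_cons_of_neg hx] at h
      cases h
      simpa using hx

theorem spec_dropRun : ∀ (l : List Bool) (j : Int),
    specRuns j (l.dropWhile (fun v => v == true)) = specRuns (j + 1) ((l.dropWhile (fun v => v == true)).tail) := by
  intro l j
  cases h : l.dropWhile (fun v => v == true) with
  | nil => simp [specRuns]
  | cons y r =>
    have hy : y = false := by simpa using dropWhile_head_not _ l y r h
    subst hy
    simp [specRuns]

theorem spec_skipFalse : ∀ (t : List Bool) (j : Int),
    specRuns j t = specRuns (j + (t.takeWhile (fun v => v == false)).length) (t.dropWhile (fun v => v == false)) := by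
  intro t
  induction t with
  | nil => intro j; simp [specRuns]
  | cons x t ih =>
    intro j
    cases x with
    | true => simp
    | false =>
      have lhs : specRuns j (false :: t) = specRuns (j + 1) t := by simp [specRuns]
      rw [lhs, ih (j + 1)]
      simp only [List.takeWhile_cons, List.dropWhile_cons, beq_self_eq_true, if_pos rfl]
      exact specRuns_congr (by push_cast [List.length_cons]; ring) _

theorem refS_eq_specRuns : ∀ (t : List Bool) (j : Int),
    (refS none j t = specRuns j t) ∧
    (∀ b : Int, refS (some b) j t =
      if t.isEmpty then []
      else (b, j + (t.takeWhile (fun v => v == true)).length - 1)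
        :: specRuns (j + (t.takeWhile (fun v => v == true)).length + 1) ((t.dropWhile (fun v => v == true)).tail)) := by
  intro t
  induction t with
  | nil => intro j; constructor <;> simp [refS, specRuns]
  | cons x t ih =>
    intro j
    cases x with
    | false =>
      refine ⟨?_, ?_⟩
      · show refS none (j+1) t = specRuns j (false :: t)
        rw [(ih (j+1)).1]
        simp [specRuns]
      · intro b
        show (b, j - 1) :: refS none (j+1) t = _
        rw [(ih (j+1)).1]
        simp [specRuns, List.takeWhile_cons, List.dropWhile_cons]
    | true =>
      cases ht : t.isEmpty with
      | true =>
        have ht' : t = [] := by simpa using ht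
        subst ht'
        refine ⟨?_, ?_⟩ <;> simp [refS, specRuns]
      | false =>
        have ht' : t ≠ [] := by simpa using ht
        have hk := (ih (j+1)).2
        refine ⟨?_, ?_⟩
        · show (if t.isEmpty then [(j, j)] else refS (some ((none : Option Int).getD j)) (j+1) t) = specRuns j (true :: t)
          rw [if_neg (by simp [ht])]
          simp only [Option.getD_none]
          rw [hk j, if_neg (by simp [ht'])]
          simp only [specRuns, if_pos rfl]
          rw [spec_dropRun t (j + 1 + ((t.takeWhile (fun v => v == true)).length : Int))]
          refine congrArg₂ List.cons ?_ (specRuns_congr (by ring) _)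
          simp only [Prod.mk.injEq]
          exact ⟨trivial, by ring⟩
        · intro b
          show (if t.isEmpty then [(b, j)] else refS (some ((some b).getD j)) (j+1) t) = _
          rw [if_neg (by simp [ht]), if_neg (by simp)]
          simp only [Option.getD_some]
          rw [hk b, if_neg (by simp [ht'])]
          simp only [List.takeWhile_cons, List.dropWhile_cons, beq_self_eq_true, if_pos rfl, List.length_cons]
          refine congrArg₂ List.cons ?_ (specRuns_congr (by push_cast [List.length_cons]; ring) _)
          simp only [Prod.mk.injEq]
          exact ⟨trivial, by push_cast [List.length_cons]; ring⟩

theorem enum_takeWhile (c : Bool) : ∀ (t : List Bool) (j : Int),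
    (PySem.List.enumerate t j).takeWhile (fun y => y.2 == c)
      = PySem.List.enumerate (t.takeWhile (fun v => v == c)) j := by
  intro t
  induction t with
  | nil => intro j; simp [PySem.List.enumerate_nil]
  | cons x t ih =>
    intro j
    by_cases hx : x = c
    · simp [PySem.List.enumerate_cons, hx, ih]
    · simp [PySem.List.enumerate_cons, hx, PySem.List.enumerate_nil]

theorem enum_dropWhile (c : Bool) : ∀ (t : List Bool) (j : Int),
    (PySem.List.enumerate t j).dropWhile (fun y => y.2 == c)
      = PySem.List.enumerate (t.dropWhile (fun v => v == c)) (j + (t.takeWhile (fun v => v == c)).length) := by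
  intro t
  induction t with
  | nil => intro j; simp [PySem.List.enumerate_nil]
  | cons x t ih =>
    intro j
    by_cases hx : x = c
    · simp only [PySem.List.enumerate_cons, List.dropWhile_cons, List.takeWhile_cons]
      simp only [hx, beq_self_eq_true, if_true, ih]
      congr 1
      simp only [List.length_cons]
      push_cast
      ring
    · simp [PySem.List.enumerate_cons, List.dropWhile_cons, List.takeWhile_cons, hx]

theorem enum_getLastD_fst : ∀ (t : List Bool) (j : Int) (d : Int × Bool),
    ((PySem.List.enumerate t j).getLastD d).1 = if t.isEmpty then d.1 else j + t.length - 1 := by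
  intro t
  induction t with
  | nil => intro j d; simp [PySem.List.enumerate_nil]
  | cons x t ih =>
    intro j d
    simp only [PySem.List.enumerate_cons, List.getLastD_cons, ih]
    cases t with
    | nil => simp
    | cons y t => simp; push_cast; ring

theorem bfold : ∀ (n : Nat) (t : List Bool), t.length ≤ n → ∀ (j : Int) (res : List (Int × Int)),
    (pyGroupBy (PySem.List.enumerate t j)).foldl emitGroup res = res ++ specRuns j t := by
  intro n
  induction n with
  | zero =>
    intro t hn j res
    have : t = [] := List.length_eq_zero_iff.1 (Nat.le_zero.1 hn)
    subst this
    simp [PySem.List.enumerate_nil, pyGroupBy, specRuns]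
  | succ n ih =>
    intro t hn j res
    cases t with
    | nil => simp [PySem.List.enumerate_nil, pyGroupBy, specRuns]
    | cons x t =>
      rw [PySem.List.enumerate_cons]
      rw [pyGroupBy]
      simp only [List.foldl_cons]
      rw [enum_takeWhile x t (j + 1), enum_dropWhile x t (j + 1)]
      rw [ih _ (le_trans (List.length_dropWhile_le _ _) (Nat.succ_le_succ_iff.1 hn)) _ _]
      cases x with
      | false =>
        have he : emitGroup res (false, (j, false) :: PySem.List.enumerate (t.takeWhile (fun v => v == false)) (j + 1)) = res := by
          simp [emitGroup]
        rw [he]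
        congr 1
        rw [spec_skipFalse (false :: t) j]
        simp only [List.takeWhile_cons, List.dropWhile_cons, beq_self_eq_true, if_pos rfl, List.length_cons]
        refine specRuns_congr (by push_cast [List.length_cons]; ring) _
      | true =>
        have he : emitGroup res (true, (j, true) :: PySem.List.enumerate (t.takeWhile (fun v => v == true)) (j + 1))
            = res ++ [(j, j + (t.takeWhile (fun v => v == true)).length)] := by
          simp only [emitGroup, if_pos rfl]
          rw [enum_getLastD_fst]
          cases hw : t.takeWhile (fun v => v == true) with
          | nil => simp
          | cons y r => simp; omega
        rw [he]
        simp only [List.append_assoc, List.singleton_append]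
        congr 1
        show _ = specRuns j (true :: t)
        simp only [specRuns, if_pos rfl]
        exact congrArg _ (specRuns_congr (by ring) _)

theorem afold (a : List Bool) : ∀ (suf : List Bool) (j : Nat) (acc : List (Int × Int)) (st : Option Nat),
    a.drop j = suf →
    ((List.range' j suf.length).foldl (stepA a) (acc, stI st)).1
      = acc ++ refS (st.map (fun b => (b : Int))) (j : Int) suf := by
  intro suf
  induction suf with
  | nil => intro j acc st h; simp [refS]
  | cons x t ih =>
    intro j acc st h
    have hlen0 : a.length - j = t.length + 1 := by
      have := congrArg List.length h
      simpa [List.length_drop] using this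
    have hj : j < a.length := by omega
    have hlen : a.length = j + t.length + 1 := by omega
    have hget : a[j]?.getD false = x := by
      have h0 : (a.drop j).getD 0 false = x := by rw [h]; rfl
      rw [List.getD_eq_getElem?_getD, List.getElem?_drop] at h0
      simpa using h0
    have hdrop : a.drop (j + 1) = t := by
      have hd : a.drop (j + 1) = (a.drop j).drop 1 := by rw [List.drop_drop]
      rw [hd, h]
      rfl
    have hcast : ((j + 1 : Nat) : Int) = (j : Int) + 1 := by push_cast; ring
    simp only [List.length_cons, List.range'_succ, List.foldl_cons]
    cases x with
    | true =>
      cases st with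
      | none =>
        have hstep : stepA a (acc, stI none) j
            = if j = a.length - 1 then (acc ++ [((j : Int), (j : Int))], (j : Int)) else (acc, (j : Int)) := by
          simp [stepA, hget, stI]
        cases t with
        | nil =>
          have hl : j = a.length - 1 := by
            simp only [List.length_nil] at hlen
            omega
          rw [hstep, if_pos hl]
          simp [refS]
        | cons y t2 =>
          have hne : ¬ (j = a.length - 1) := by
            simp only [List.length_cons] at hlen
            omega
          rw [hstep, if_neg hne]
          have hih := ih (j + 1) acc (some j) hdrop
          rw [hcast] at hih
          simp only [stI, Option.map_some] at hih
          rw [hih]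
          simp [refS]
      | some b =>
        have hb : ¬ ((b : Int) = -1) := by omega
        have hstep : stepA a (acc, stI (some b)) j
            = if j = a.length - 1 then (acc ++ [((b : Int), (j : Int))], (b : Int)) else (acc, (b : Int)) := by
          simp [stepA, hget, stI, hb]
        cases t with
        | nil =>
          have hl : j = a.length - 1 := by
            simp only [List.length_nil] at hlen
            omega
          rw [hstep, if_pos hl]
          simp [refS]
        | cons y t2 =>
          have hne : ¬ (j = a.length - 1) := by
            simp only [List.length_cons] at hlen
            omega
          rw [hstep, if_neg hne]
          have hih := ih (j + 1) acc (some b) hdrop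
          rw [hcast] at hih
          simp only [stI, Option.map_some] at hih
          rw [hih]
          simp [refS]
    | false =>
      cases st with
      | none =>
        have hstep : stepA a (acc, stI none) j = (acc, stI none) := by
          simp [stepA, hget, stI]
        rw [hstep]
        have hih := ih (j + 1) acc none hdrop
        rw [hcast] at hih
        rw [hih]
        simp [refS]
      | some b =>
        have hstep : stepA a (acc, stI (some b)) j = (acc ++ [((b : Int), (j : Int) - 1)], stI none) := by
          simp [stepA, hget, stI]
        rw [hstep]
        have hih := ih (j + 1) (acc ++ [((b : Int), (j : Int) - 1)]) none hdrop
        rw [hcast] at hih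
        rw [hih]
        simp [refS]

-- ===== VERDICT (by name: the statement is the Claim_ definition above) =====
theorem markers_true_intervals_spec : Claim_equal_markers_true_intervals := by
  intro a _
  unfold Spec_markers_true_intervals
  have hA : markers_true_intervals a = refS none 0 a := by
    have := afold a a 0 [] none (by simp)
    simpa [markers_true_intervals, List.range_eq_range', stI] using this
  have hB : markers_true_intervals_alt a = specRuns 0 a := by
    have := bfold a.length a (le_refl _) 0 []
    simpa [markers_true_intervals_alt] using this
  rw [hA, hB, (refS_eq_specRuns a 0).1]
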